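-- pv_equiv track=rewrite | github.com/WakelessDragon/exp | exp/AST.py | __find_matched_left
-- ===== SOURCE A (Python) =====
-- def __find_matched_left(tokens, right_idx, left_char):
--     rb_stk = []
--     for idx in reversed(range(right_idx + 1)):
--         tk = tokens[idx]
--         if idx == right_idx or tk == rb_stk[-1]:
--             rb_stk.append(tk)
--         else:
--             if tk == left_char:
--                 rb_stk.pop()
--                 if len(rb_stk) == 0:
--                     return idx
-- ===== SOURCE B (Python) =====
-- def __find_matched_left(tokens, right_idx, left_char):
--     if right_idx < 0:
--         return None
--     right_char = tokens[right_idx]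
--
--     def delta(tk):
--         return 1 if tk == right_char else (-1 if tk == left_char else 0)
--
--     prefix = tokens[:right_idx]
--     total = sum(delta(tk) for tk in prefix)
--     s = 0
--     best = None
--     for idx, tk in enumerate(prefix):
--         s += delta(tk)
--         if tk == left_char and tk != right_char and s == total:
--             best = idx
--     return best
-- ===== Notes on version B (the rewrite author's own statement) =====
-- stated objective: alternative
-- what changed: Replaces A's backward scan with a stack of bracket copies by two forward passes over tokens[:right_idx]: one computes the total bracket balance, the second keeps a running balance and records the last index holding left_char whose suffix balance is zero (a closed-form matching condition), returning that recorded index.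
import Mathlib
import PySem

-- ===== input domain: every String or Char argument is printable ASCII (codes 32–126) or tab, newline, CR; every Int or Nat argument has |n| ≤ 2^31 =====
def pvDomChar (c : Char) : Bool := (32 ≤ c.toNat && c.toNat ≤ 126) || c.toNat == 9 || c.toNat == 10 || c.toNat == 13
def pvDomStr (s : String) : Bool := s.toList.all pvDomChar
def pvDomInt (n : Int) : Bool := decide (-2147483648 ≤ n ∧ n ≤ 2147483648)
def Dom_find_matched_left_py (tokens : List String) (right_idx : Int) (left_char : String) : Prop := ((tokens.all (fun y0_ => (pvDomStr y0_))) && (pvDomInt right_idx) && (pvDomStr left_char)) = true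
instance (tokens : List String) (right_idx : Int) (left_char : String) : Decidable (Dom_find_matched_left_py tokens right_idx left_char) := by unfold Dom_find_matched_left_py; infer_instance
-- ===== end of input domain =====

-- B replaces A's backward scan with a stack of bracket copies by two forward passes over
-- tokens[:right_idx]: compute the total bracket balance, then record the last index holding
-- left_char whose running balance equals that total (net balance of its suffix is zero).

-- ===== PORT A =====
-- loop 'for idx in reversed(range(right_idx + 1))' over the index list, carrying the stack rb_stk
-- (top = head). Where Python raises (tokens[idx] out of range, rb_stk[-1] on an empty stack) the
-- PySem primitive / the [] branch yields none; those inputs are outside Pre_.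
def pvGoA (tokens : List String) (right_idx : Int) (left_char : String) :
    List Int → List String → Option Int
  | [], _ => none
  | idx :: rest, stk =>
    match PySem.List.pyGet? tokens idx with
    | none => none
    | some tk =>
      if idx = right_idx then pvGoA tokens right_idx left_char rest (tk :: stk)
      else
        match stk with
        | [] => none
        | top :: s =>
          if tk = top then pvGoA tokens right_idx left_char rest (tk :: stk)
          else if tk = left_char then
            (if s = [] then some idx else pvGoA tokens right_idx left_char rest s)
          else pvGoA tokens right_idx left_char rest stk

def find_matched_left_py (tokens : List String) (right_idx : Int) (left_char : String) : Option Int :=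
  pvGoA tokens right_idx left_char (PySem.List.pyRange right_idx (-1) (-1)) []

-- ===== PORT B =====
-- delta(tk) from Source B: +1 for the right bracket, -1 for the left bracket, 0 otherwise
def pvDelta (rc lc tk : String) : Int := if tk = rc then 1 else if tk = lc then -1 else 0

-- body of Source B's 'for idx, tk in enumerate(prefix)' loop: state = (running sum s, best)
def pvStepB (rc lc : String) (total : Int) (st : Int × Option Int) (p : Int × String) :
    Int × Option Int :=
  (st.1 + pvDelta rc lc p.2,
   if p.2 = lc ∧ p.2 ≠ rc ∧ st.1 + pvDelta rc lc p.2 = total then some p.1 else st.2)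

def find_matched_left_py_alt (tokens : List String) (right_idx : Int) (left_char : String) : Option Int :=
  if right_idx < 0 then none
  else
    match PySem.List.pyGet? tokens right_idx with
    | none => none
    | some rc =>
      let pfx := PySem.List.slice tokens none (some right_idx)
      let total := (pfx.map (pvDelta rc left_char)).sum
      ((PySem.List.enumerate pfx 0).foldl (pvStepB rc left_char total) (0, none)).2

-- ===== PRECONDITION & SPEC =====
-- Python A raises IndexError iff right_idx ≥ len(tokens) (for right_idx < 0 the loop is empty).
def Pre_find_matched_left_py (tokens : List String) (right_idx : Int) (left_char : String) : Prop :=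
  right_idx < (tokens.length : Int)
instance (tokens : List String) (right_idx : Int) (left_char : String) : Decidable (Pre_find_matched_left_py tokens right_idx left_char) := by unfold Pre_find_matched_left_py; infer_instance

def pvWitness_find_matched_left_py : List String × Int × String := (["(", "x", ")"], 2, "(")

def Spec_find_matched_left_py (tokens : List String) (right_idx : Int) (left_char : String) (out : Option Int) : Prop := out = find_matched_left_py_alt tokens right_idx left_char
instance (tokens : List String) (right_idx : Int) (left_char : String) (out : Option Int) : Decidable (Spec_find_matched_left_py tokens right_idx left_char out) := by unfold Spec_find_matched_left_py; infer_instance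

-- ===== CLAIM (what is proved, stated in full; the proofs are below) =====
def Claim_equal_find_matched_left_py : Prop := ∀ (tokens : List String) (right_idx : Int) (left_char : String), Dom_find_matched_left_py tokens right_idx left_char → Pre_find_matched_left_py tokens right_idx left_char → Spec_find_matched_left_py tokens right_idx left_char (find_matched_left_py tokens right_idx left_char)

-- ===== LEMMAS AND PROOFS =====

-- Proof-only intermediate: A's stack collapsed to an integer depth counter (backward scan).
def pvCnt (tokens : List String) (rc lc : String) (idx depth : Int) : Option Int :=
  if _h : idx < 0 then none
  else
    match PySem.List.pyGet? tokens idx with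
    | none => none
    | some tk =>
      if tk = rc then pvCnt tokens rc lc (idx - 1) (depth + 1)
      else if tk = lc then
        (if depth = 1 then some idx else pvCnt tokens rc lc (idx - 1) (depth - 1))
      else pvCnt tokens rc lc (idx - 1) depth
termination_by (idx + 1).toNat
decreasing_by all_goals omega

-- A's stack is (d+1) copies of the right bracket; its remaining scan is the counter scan.
lemma pv_key (tokens : List String) (right_idx : Int) (left_char rc : String) :
    ∀ (j : Int), -1 ≤ j → j < right_idx → ∀ (d : Nat),
      pvGoA tokens right_idx left_char (PySem.List.pyRange j (-1) (-1)) (List.replicate (d + 1) rc)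
        = pvCnt tokens rc left_char j ((d : Int) + 1) := by
  intro j hj
  induction j, hj using Int.le_induction with
  | base =>
    intro _ d
    rw [PySem.List.pyRange_neg_one_eq_nil (by omega), pvCnt]
    simp [pvGoA]
  | succ j hj ih =>
    intro hlt d
    rw [PySem.List.pyRange_neg_one_cons (by omega), pvCnt]
    have hne : ¬ (j + 1 < 0) := by omega
    simp only [hne, dif_neg, not_false_iff]
    cases hget : PySem.List.pyGet? tokens (j + 1) with
    | none => simp [pvGoA, hget]
    | some tk =>
      have hidx : ¬ (j + 1 = right_idx) := by omega
      simp only [pvGoA, hget, hidx, if_neg, not_false_iff, List.replicate_succ]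
      by_cases h1 : tk = rc
      · subst h1
        have key := ih (by omega) (d + 1)
        simp only [List.replicate_succ] at key
        push_cast at key
        simp only [show (j + 1 - 1 : Int) = j from by ring]
        exact key
      · simp only [if_neg h1]
        by_cases h2 : tk = left_char
        · simp only [if_pos h2]
          cases d with
          | zero =>
            simp [List.replicate]
          | succ d' =>
            have hrep : ¬ (List.replicate (d' + 1) rc = ([] : List String)) := by
              simp [List.replicate_succ]
            simp only [if_neg hrep, show (j + 1 - 1 : Int) = j from by ring]
            rw [if_neg (by push_cast; omega)]
            rw [show (((d' + 1 : Nat) : Int)) + 1 - 1 = (d' : Int) + 1 from by push_cast; ring]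
            exact ih (by omega) d'
        · simp only [if_neg h2, show (j + 1 - 1 : Int) = j from by ring,
            ← List.replicate_succ]
          exact ih (by omega) d

-- mapping a function of the value over an enumeration ignores the indices
lemma pv_map_enum {a b : Type} (f : a → b) : ∀ (xs : List a) (s : Int),
    (PySem.List.enumerate xs s).map (fun p => f p.2) = xs.map f := by
  intro xs
  induction xs with
  | nil => intro s; simp [PySem.List.enumerate_nil]
  | cons x rest ih => intro s; simp [PySem.List.enumerate_cons, ih]

-- The running sum of B's fold is the starting sum plus the balance of the traversed tokens.
lemma pv_fst (rc lc : String) (total : Int) :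
    ∀ (l : List (Int × String)) (s : Int) (b : Option Int),
      (l.foldl (pvStepB rc lc total) (s, b)).1 = s + (l.map (fun p => pvDelta rc lc p.2)).sum := by
  intro l
  induction l with
  | nil => intro s b; simp
  | cons p rest ih =>
    intro s b
    simp only [List.foldl_cons, List.map_cons, List.sum_cons, pvStepB, ih]
    ring

-- The counter scan down from j with depth d picks exactly the last index of the prefix
-- tokens[:j+1] whose token is lc (and not rc) and whose running balance equals d + S(j+1) - 1.
lemma pv_cnt_eq_fold (tokens : List String) (rc lc : String) :
    ∀ (j : Int), -1 ≤ j → j < (tokens.length : Int) → ∀ (d : Int),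
      pvCnt tokens rc lc j d =
        ((PySem.List.enumerate (tokens.take (j + 1).toNat) 0).foldl
          (pvStepB rc lc (d + ((tokens.take (j + 1).toNat).map (pvDelta rc lc)).sum - 1))
          (0, none)).2 := by
  intro j hj
  induction j, hj using Int.le_induction with
  | base =>
    intro _ d
    rw [pvCnt]
    simp
  | succ j hj ih =>
    intro hlen d
    have hnat : ((j + 1).toNat : Int) = j + 1 := by omega
    have hlt : (j + 1).toNat < tokens.length := by omega
    have hget : PySem.List.pyGet? tokens (j + 1) = some (tokens[(j + 1).toNat]) := by
      conv_lhs => rw [← hnat]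
      rw [PySem.List.pyGet?_natCast]
      exact List.getElem?_eq_getElem hlt
    set tk := tokens[(j + 1).toNat] with htk
    -- split the prefix: take (j+2) = take (j+1) ++ [tk]
    have htake : tokens.take (j + 1 + 1).toNat = tokens.take (j + 1).toNat ++ [tk] := by
      have h2 : (j + 1 + 1).toNat = (j + 1).toNat + 1 := by omega
      rw [h2, List.take_add_one]
      simp [hlt, htk]
    have hlenpfx : ((tokens.take (j + 1).toNat).length : Int) = j + 1 := by
      rw [List.length_take]
      omega
    rw [pvCnt]
    have hne : ¬ (j + 1 < 0) := by omega
    simp only [hne, dif_neg, not_false_iff, hget]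
    rw [htake, PySem.List.enumerate_append, List.foldl_append]
    simp only [PySem.List.enumerate, List.foldl_cons, List.foldl_nil]
    simp only [List.map_append, List.sum_append, List.map_cons, List.sum_cons, List.map_nil,
      List.sum_nil, add_zero]
    set l := PySem.List.enumerate (tokens.take (j + 1).toNat) 0 with hl
    set S := ((tokens.take (j + 1).toNat).map (pvDelta rc lc)).sum with hS
    have hfst : (l.foldl (pvStepB rc lc (d + (S + pvDelta rc lc tk) - 1)) (0, none)).1 = S := by
      rw [pv_fst]
      simp only [hl, hS]
      rw [pv_map_enum (pvDelta rc lc) (tokens.take (j+1).toNat) 0]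
      ring
    by_cases h1 : tk = rc
    · -- push: depth + 1; the condition at the last element fails (tk = rc)
      have hdelta : pvDelta rc lc tk = 1 := by simp [pvDelta, h1]
      rw [hdelta] at hfst
      rw [if_pos h1, show (j + 1 - 1 : Int) = j from by ring]
      simp only [pvStepB, hdelta, hfst]
      have hcond : ¬ (tk = lc ∧ tk ≠ rc ∧ S + 1 = d + (S + 1) - 1) := by
        rintro ⟨_, hne2, _⟩; exact hne2 h1
      rw [if_neg hcond, show d + (S + 1) - 1 = d + 1 + S - 1 from by ring]
      exact ih (by omega) (d + 1)
    · by_cases h2 : tk = lc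
      · have hdelta : pvDelta rc lc tk = -1 := by
          unfold pvDelta; rw [if_neg h1, if_pos h2]
        rw [hdelta] at hfst
        by_cases h3 : d = 1
        · -- return some (j+1); the fold's last step also yields some (j+1)
          rw [if_neg h1, if_pos h2, if_pos h3]
          simp only [pvStepB, hdelta, hfst]
          have hcondpos : tk = lc ∧ tk ≠ rc ∧ S + (-1) = d + (S + (-1)) - 1 :=
            ⟨h2, h1, by omega⟩
          rw [if_pos hcondpos, hlenpfx, zero_add]
        · rw [if_neg h1, if_pos h2, if_neg h3, show (j + 1 - 1 : Int) = j from by ring]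
          simp only [pvStepB, hdelta, hfst]
          have hcond : ¬ (tk = lc ∧ tk ≠ rc ∧ S + (-1) = d + (S + (-1)) - 1) := by
            rintro ⟨_, _, he⟩; omega
          rw [if_neg hcond, show d + (S + (-1)) - 1 = d - 1 + S - 1 from by ring]
          exact ih (by omega) (d - 1)
      · have hdelta : pvDelta rc lc tk = 0 := by simp [pvDelta, h1, h2]
        rw [hdelta] at hfst
        rw [if_neg h1, if_neg h2, show (j + 1 - 1 : Int) = j from by ring]
        simp only [pvStepB, hdelta, hfst]
        have hcond : ¬ (tk = lc ∧ tk ≠ rc ∧ S + 0 = d + (S + 0) - 1) := by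
          rintro ⟨he, _, _⟩; exact h2 he
        rw [if_neg hcond, show d + (S + 0) - 1 = d + S - 1 from by ring]
        exact ih (by omega) d

-- ===== VERDICT (by name: the statement is the Claim_ definition above) =====
theorem find_matched_left_py_spec : Claim_equal_find_matched_left_py := by
  intro tokens right_idx left_char _ hpre
  unfold Spec_find_matched_left_py find_matched_left_py find_matched_left_py_alt
  by_cases hneg : right_idx < 0
  · rw [PySem.List.pyRange_neg_one_eq_nil (by omega), if_pos hneg]
    simp [pvGoA]
  · rw [PySem.List.pyRange_neg_one_cons (by omega), if_neg hneg]
    cases hget : PySem.List.pyGet? tokens right_idx with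
    | none => simp [pvGoA, hget]
    | some rc =>
      simp only [pvGoA, hget]
      have hA : pvGoA tokens right_idx left_char (PySem.List.pyRange (right_idx - 1) (-1) (-1))
          (rc :: []) = pvCnt tokens rc left_char (right_idx - 1) 1 := by
        have := pv_key tokens right_idx left_char rc (right_idx - 1) (by omega) (by omega) 0
        simpa using this
      rw [if_true, hA]
      have hslice : PySem.List.slice tokens none (some right_idx) = tokens.take right_idx.toNat :=
        PySem.List.slice_to tokens (by omega)
      have hfold := pv_cnt_eq_fold tokens rc left_char (right_idx - 1) (by omega)
        (by unfold Pre_find_matched_left_py at hpre; omega) 1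
      rw [show (right_idx - 1 + 1 : Int) = right_idx from by ring] at hfold
      rw [show (1 : Int) + ((tokens.take right_idx.toNat).map (pvDelta rc left_char)).sum - 1
            = ((tokens.take right_idx.toNat).map (pvDelta rc left_char)).sum from by ring] at hfold
      rw [hslice]
      exact hfold
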